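-- pv_equiv track=rewrite | github.com/CodingThrust/problem-reductions | docs/paper/verify-reductions/verify_three_dimensional_matching_numerical_3_dimensional_matching.py | is_valid_3dm_matching
-- ===== SOURCE A (Python) =====
-- def is_valid_3dm_matching(q, triples, selected):
--     if len(selected) != q:
--         return False
--     uw, ux, uy = set(), set(), set()
--     for idx in selected:
--         w, x, y = triples[idx]
--         if w in uw or x in ux or y in uy:
--             return False
--         uw.add(w); ux.add(x); uy.add(y)
--     return len(uw) == q and len(ux) == q and len(uy) == q
-- ===== SOURCE B (Python) =====
-- def is_valid_3dm_matching(q, triples, selected):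
--     if len(selected) != q:
--         return False
--     for k, idx in enumerate(selected):
--         w, x, y = triples[idx]
--         for jdx in selected[:k]:
--             pw, px, py = triples[jdx]
--             if w == pw or x == px or y == py:
--                 return False
--     return True
-- ===== Notes on version B (the rewrite author's own statement) =====
-- stated objective: alternative
-- what changed: Replaces the three incrementally maintained seen-sets and the final cardinality comparison with a set-free brute-force pairwise scan: each selected triple is compared coordinate-wise against every earlier selected triple, and a clean double loop returns True outright.
import Mathlib
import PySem

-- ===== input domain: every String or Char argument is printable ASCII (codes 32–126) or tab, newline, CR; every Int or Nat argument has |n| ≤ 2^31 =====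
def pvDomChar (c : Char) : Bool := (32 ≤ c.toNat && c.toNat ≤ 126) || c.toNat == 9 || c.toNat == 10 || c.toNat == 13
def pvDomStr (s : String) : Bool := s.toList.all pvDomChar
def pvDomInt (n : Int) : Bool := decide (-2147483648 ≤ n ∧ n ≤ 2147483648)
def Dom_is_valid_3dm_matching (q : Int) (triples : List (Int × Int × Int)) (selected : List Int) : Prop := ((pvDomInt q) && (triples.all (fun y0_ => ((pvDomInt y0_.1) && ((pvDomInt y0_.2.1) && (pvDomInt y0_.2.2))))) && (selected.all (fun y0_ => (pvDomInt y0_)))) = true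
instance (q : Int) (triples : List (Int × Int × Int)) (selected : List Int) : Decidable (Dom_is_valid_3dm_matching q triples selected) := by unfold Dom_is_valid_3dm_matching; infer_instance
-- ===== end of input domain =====

-- B drops A's three seen-sets and their final cardinality comparison entirely: it brute-force
-- compares each selected triple coordinate-wise against every earlier selected triple (objective:
-- alternative; not faster). Both raise IndexError on exactly the same inputs.

-- ===== PORT A =====
-- the loop 'for idx in selected' with the three seen-sets; early 'return False' on a duplicate
def pvALoop (q : Int) (triples : List (Int × Int × Int)) :
    List Int → PySem.Set Int → PySem.Set Int → PySem.Set Int → Bool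
  | [], uw, ux, uy =>
      ((PySem.Set.len uw == q) && (PySem.Set.len ux == q)) && (PySem.Set.len uy == q)
  | idx :: rest, uw, ux, uy =>
      -- w, x, y = triples[idx]  (pyGetD is exact under Pre_'s no-raise condition)
      let t := PySem.List.pyGetD triples idx (0, 0, 0)
      if (PySem.Set.contains uw t.1 || PySem.Set.contains ux t.2.1) || PySem.Set.contains uy t.2.2 then
        false
      else
        pvALoop q triples rest (PySem.Set.add uw t.1) (PySem.Set.add ux t.2.1) (PySem.Set.add uy t.2.2)

def is_valid_3dm_matching (q : Int) (triples : List (Int × Int × Int)) (selected : List Int) : Bool :=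
  if (selected.length : Int) != q then false
  else pvALoop q triples selected PySem.Set.empty PySem.Set.empty PySem.Set.empty

-- ===== PORT B =====
-- inner loop 'for jdx in selected[:k]': compare (w,x,y) against each earlier selected triple
def pvBInner (w x y : Int) (triples : List (Int × Int × Int)) : List Int → Bool
  | [] => false
  | jdx :: rest =>
      let p := PySem.List.pyGetD triples jdx (0, 0, 0)
      if (w == p.1 || x == p.2.1) || y == p.2.2 then true
      else pvBInner w x y triples rest

-- outer loop 'for k, idx in enumerate(selected)'; pref is the already-scanned prefix selected[:k]
def pvBOuter (triples : List (Int × Int × Int)) : List Int → List Int → Bool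
  | _pref, [] => true
  | pref, idx :: rest =>
      let t := PySem.List.pyGetD triples idx (0, 0, 0)
      if pvBInner t.1 t.2.1 t.2.2 triples pref then false
      else pvBOuter triples (pref ++ [idx]) rest

def is_valid_3dm_matching_alt (q : Int) (triples : List (Int × Int × Int)) (selected : List Int) : Bool :=
  if (selected.length : Int) != q then false
  else pvBOuter triples [] selected

-- ===== PRECONDITION & SPEC =====
-- Pre_ excludes exactly the inputs where the Pythons raise IndexError (both A and B do, at the same
-- access): len(selected) == q and some selected position k0 holds an out-of-range index while all
-- earlier positions are in range and the triples at the earlier positions have no coordinate clash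
-- (a clash would have returned False before position k0 is touched).
def Pre_is_valid_3dm_matching (q : Int) (triples : List (Int × Int × Int)) (selected : List Int) : Prop :=
  (selected.length : Int) = q →
    ¬ ∃ k0 < selected.length,
        ¬ PySem.Raise.InRange triples.length (selected.getD k0 0) ∧
        (∀ j < k0, PySem.Raise.InRange triples.length (selected.getD j 0)) ∧
        (∀ j' < k0, ∀ j < j',
          ¬ ((PySem.List.pyGetD triples (selected.getD j 0) (0, 0, 0)).1
               = (PySem.List.pyGetD triples (selected.getD j' 0) (0, 0, 0)).1 ∨
             (PySem.List.pyGetD triples (selected.getD j 0) (0, 0, 0)).2.1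
               = (PySem.List.pyGetD triples (selected.getD j' 0) (0, 0, 0)).2.1 ∨
             (PySem.List.pyGetD triples (selected.getD j 0) (0, 0, 0)).2.2
               = (PySem.List.pyGetD triples (selected.getD j' 0) (0, 0, 0)).2.2))

instance (q : Int) (triples : List (Int × Int × Int)) (selected : List Int) : Decidable (Pre_is_valid_3dm_matching q triples selected) := by unfold Pre_is_valid_3dm_matching; infer_instance

def pvWitness_is_valid_3dm_matching : Int × (List (Int × Int × Int)) × List Int :=
  (2, [(1, 2, 3), (4, 5, 6)], [0, 1])

def Spec_is_valid_3dm_matching (q : Int) (triples : List (Int × Int × Int)) (selected : List Int) (out : Bool) : Prop := out = is_valid_3dm_matching_alt q triples selected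
instance (q : Int) (triples : List (Int × Int × Int)) (selected : List Int) (out : Bool) : Decidable (Spec_is_valid_3dm_matching q triples selected out) := by unfold Spec_is_valid_3dm_matching; infer_instance

-- ===== CLAIM (what is proved, stated in full; the proofs are below) =====
def Claim_equal_is_valid_3dm_matching : Prop := ∀ (q : Int) (triples : List (Int × Int × Int)) (selected : List Int), Dom_is_valid_3dm_matching q triples selected → Pre_is_valid_3dm_matching q triples selected → Spec_is_valid_3dm_matching q triples selected (is_valid_3dm_matching q triples selected)

-- ===== LEMMAS AND PROOFS =====

-- the three coordinate columns of the already-scanned prefix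
def pvCol1 (triples : List (Int × Int × Int)) (pref : List Int) : List Int :=
  pref.map (fun j => (PySem.List.pyGetD triples j (0, 0, 0)).1)
def pvCol2 (triples : List (Int × Int × Int)) (pref : List Int) : List Int :=
  pref.map (fun j => (PySem.List.pyGetD triples j (0, 0, 0)).2.1)
def pvCol3 (triples : List (Int × Int × Int)) (pref : List Int) : List Int :=
  pref.map (fun j => (PySem.List.pyGetD triples j (0, 0, 0)).2.2)

theorem pv_nodup_append_singleton (s : List Int) (v : Int) (hs : s.Nodup) (hv : v ∉ s) :
    (s ++ [v]).Nodup := by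
  simp [List.nodup_append, hs]
  exact fun a ha h => hv (h ▸ ha)

-- B's inner scan of the prefix is A's three set-membership tests
theorem pv_inner_eq (triples : List (Int × Int × Int)) (w x y : Int) :
    ∀ pref : List Int,
      pvBInner w x y triples pref =
        ((PySem.Set.contains (pvCol1 triples pref) w ||
          PySem.Set.contains (pvCol2 triples pref) x) ||
         PySem.Set.contains (pvCol3 triples pref) y) := by
  intro pref
  induction pref with
  | nil => simp [pvBInner, pvCol1, pvCol2, pvCol3, PySem.Set.contains]
  | cons jdx pref ih =>
    simp only [pvBInner, pvCol1, pvCol2, pvCol3, List.map_cons, PySem.Set.contains] at *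
    rw [Bool.eq_iff_iff]
    by_cases h : (w == (PySem.List.pyGetD triples jdx (0, 0, 0)).1 ||
        x == (PySem.List.pyGetD triples jdx (0, 0, 0)).2.1) ||
        y == (PySem.List.pyGetD triples jdx (0, 0, 0)).2.2
    · rw [if_pos h]
      simp only [Bool.or_eq_true, beq_iff_eq] at h
      simp only [Bool.or_eq_true, List.contains_cons, beq_iff_eq, true_iff]
      tauto
    · rw [if_neg h, ih]
      simp only [Bool.or_eq_true, beq_iff_eq, not_or] at h
      obtain ⟨⟨h1, h2⟩, h3⟩ := h
      simp only [Bool.or_eq_true, List.contains_cons, beq_iff_eq] at *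
      constructor
      · tauto
      · rintro ((h | h) | h) <;> tauto

-- A's loop over the rest, started on the prefix's columns as seen-sets, is B's outer loop
theorem pv_main (q : Int) (triples : List (Int × Int × Int)) :
    ∀ (rest pref : List Int),
      (pvCol1 triples pref).Nodup → (pvCol2 triples pref).Nodup → (pvCol3 triples pref).Nodup →
      ((pref.length : Int) + rest.length = q) →
      pvALoop q triples rest (pvCol1 triples pref) (pvCol2 triples pref) (pvCol3 triples pref)
        = pvBOuter triples pref rest := by
  intro rest
  induction rest with
  | nil =>
    intro pref h1 h2 h3 hq
    simp only [List.length_nil, Nat.cast_zero, add_zero] at hq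
    simp [pvALoop, pvBOuter, PySem.Set.len, pvCol1, pvCol2, pvCol3, hq]
  | cons idx rest ih =>
    intro pref h1 h2 h3 hq
    simp only [pvALoop, pvBOuter]
    rw [pv_inner_eq]
    set t := PySem.List.pyGetD triples idx (0, 0, 0) with ht
    by_cases hc : ((PySem.Set.contains (pvCol1 triples pref) t.1 ||
        PySem.Set.contains (pvCol2 triples pref) t.2.1) ||
        PySem.Set.contains (pvCol3 triples pref) t.2.2)
    · rw [if_pos hc, if_pos hc]
    · rw [if_neg hc, if_neg hc]
      simp only [Bool.or_eq_true, PySem.Set.contains,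
        List.contains_iff_mem, not_or] at hc
      obtain ⟨⟨hm1, hm2⟩, hm3⟩ := hc
      have hc1 : PySem.Set.contains (pvCol1 triples pref) t.1 = false := by
        simp only [PySem.Set.contains]; simpa [List.contains_iff_mem] using hm1
      have hc2 : PySem.Set.contains (pvCol2 triples pref) t.2.1 = false := by
        simp only [PySem.Set.contains]; simpa [List.contains_iff_mem] using hm2
      have hc3 : PySem.Set.contains (pvCol3 triples pref) t.2.2 = false := by
        simp only [PySem.Set.contains]; simpa [List.contains_iff_mem] using hm3
      have e1 : PySem.Set.add (pvCol1 triples pref) t.1 = pvCol1 triples (pref ++ [idx]) := by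
        unfold PySem.Set.add
        rw [hc1]
        simp [pvCol1, ht]
      have e2 : PySem.Set.add (pvCol2 triples pref) t.2.1 = pvCol2 triples (pref ++ [idx]) := by
        unfold PySem.Set.add
        rw [hc2]
        simp [pvCol2, ht]
      have e3 : PySem.Set.add (pvCol3 triples pref) t.2.2 = pvCol3 triples (pref ++ [idx]) := by
        unfold PySem.Set.add
        rw [hc3]
        simp [pvCol3, ht]
      rw [e1, e2, e3]
      refine ih (pref ++ [idx]) ?_ ?_ ?_ ?_
      · have : pvCol1 triples (pref ++ [idx]) = pvCol1 triples pref ++ [t.1] := by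
          simp [pvCol1, ht]
        rw [this]; exact pv_nodup_append_singleton _ _ h1 hm1
      · have : pvCol2 triples (pref ++ [idx]) = pvCol2 triples pref ++ [t.2.1] := by
          simp [pvCol2, ht]
        rw [this]; exact pv_nodup_append_singleton _ _ h2 hm2
      · have : pvCol3 triples (pref ++ [idx]) = pvCol3 triples pref ++ [t.2.2] := by
          simp [pvCol3, ht]
        rw [this]; exact pv_nodup_append_singleton _ _ h3 hm3
      · simp only [List.length_append, List.length_cons, List.length_nil] at hq ⊢
        push_cast at hq ⊢
        omega

-- ===== VERDICT (by name: the statement is the Claim_ definition above) =====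
theorem is_valid_3dm_matching_spec : Claim_equal_is_valid_3dm_matching := by
  intro q triples selected _ _
  unfold Spec_is_valid_3dm_matching is_valid_3dm_matching is_valid_3dm_matching_alt
  by_cases hlen : (selected.length : Int) = q
  · rw [if_neg (by simp [hlen]), if_neg (by simp [hlen])]
    have h := pv_main q triples selected []
      (by simp [pvCol1]) (by simp [pvCol2]) (by simp [pvCol3])
      (by simpa using hlen)
    simpa [pvCol1, pvCol2, pvCol3, PySem.Set.empty] using h
  · rw [if_pos (by simp [hlen]), if_pos (by simp [hlen])]
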